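-- pv_equiv track=rewrite | github.com/Sid-131/Second-project | tests/test_phase3.py | _count_quotes_in_md
-- ===== SOURCE A (Python) =====
-- def _count_quotes_in_md(markdown: str) -> int:
--     """Count blockquote lines under the ## Real User Quotes heading."""
--     in_section = False
--     count = 0
--     for line in markdown.splitlines():
--         stripped = line.strip()
--         if stripped.startswith("## Real User Quotes"):
--             in_section = True
--             continue
--         if in_section:
--             if stripped.startswith("## "):
--                 break
--             if stripped.startswith(">"):
--                 count += 1
--     return count
-- ===== SOURCE B (Python) =====
-- def _count_quotes_in_md(markdown: str) -> int:
--     """Count blockquote lines under the ## Real User Quotes heading."""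
--     lines = [ln.strip() for ln in markdown.splitlines()]
--     hits = [i for i, s in enumerate(lines) if s.startswith("## Real User Quotes")]
--     if not hits:
--         return 0
--     body = lines[hits[0] + 1:]
--     ends = [i for i, s in enumerate(body) if s.startswith("## ")]
--     if ends:
--         body = body[:ends[0]]
--     return sum(s.startswith(">") for s in body)
-- ===== Notes on version B (the rewrite author's own statement) =====
-- stated objective: idiomatic
-- what changed: Replaced the stateful flag+break single pass with a locate-then-slice-then-count pipeline (find the heading index, slice to the body bounded by the next '## ' heading, count '>' lines); Pre_ excludes markdowns with more than one '## Real User Quotes' heading line, where A's choice to keep the section open past a repeated heading and B's choice to close it are both defensible readings of a duplicated heading.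
-- outside the precondition, e.g. on _count_quotes_in_md('## Real User Quotes\n> a\n## Real User Quotes\n> b'): A returns 2, B returns 1
import Mathlib
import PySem

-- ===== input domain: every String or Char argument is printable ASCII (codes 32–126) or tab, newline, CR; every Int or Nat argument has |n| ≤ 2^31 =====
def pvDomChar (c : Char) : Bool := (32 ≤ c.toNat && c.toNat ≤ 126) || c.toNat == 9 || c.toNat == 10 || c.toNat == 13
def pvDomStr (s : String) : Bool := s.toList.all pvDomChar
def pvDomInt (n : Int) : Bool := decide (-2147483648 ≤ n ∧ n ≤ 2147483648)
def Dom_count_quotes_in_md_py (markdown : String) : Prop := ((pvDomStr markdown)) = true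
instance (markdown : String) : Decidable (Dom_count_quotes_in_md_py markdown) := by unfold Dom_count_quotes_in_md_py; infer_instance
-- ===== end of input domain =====

-- B replaces A's stateful flag+break pass with a locate-then-slice-then-count pipeline (idiomatic; same cost).

-- ===== PORT A =====
-- the for-loop of A, with its in_section flag and count; 'break' returns count directly
def pvALoop (lines : List String) (inSec : Bool) (count : Int) : Int :=
  match lines with
  | [] => count
  | line :: rest =>
    let stripped := PySem.Str.strip line
    if PySem.Str.startswith stripped "## Real User Quotes" then pvALoop rest true count
    else if inSec then
      if PySem.Str.startswith stripped "## " then count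
      else if PySem.Str.startswith stripped ">" then pvALoop rest inSec (count + 1)
      else pvALoop rest inSec count
    else pvALoop rest inSec count

def count_quotes_in_md_py (markdown : String) : Int :=
  pvALoop (PySem.Str.splitlines markdown) false 0

-- ===== PORT B =====
def count_quotes_in_md_py_alt (markdown : String) : Int :=
  let lines := (PySem.Str.splitlines markdown).map PySem.Str.strip
  let hits := ((PySem.List.enumerate lines).filter
      (fun p => PySem.Str.startswith p.2 "## Real User Quotes")).map Prod.fst
  match hits with
  | [] => 0
  | h :: _ =>
    let body := PySem.List.slice lines (some (h + 1)) none
    let ends := ((PySem.List.enumerate body).filter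
        (fun p => PySem.Str.startswith p.2 "## ")).map Prod.fst
    let body2 := match ends with
      | [] => body
      | e :: _ => PySem.List.slice body none (some e)
    ((body2.filter (fun s => PySem.Str.startswith s ">")).length : Int)

-- ===== PRECONDITION & SPEC =====
-- Pre_ excludes markdowns with MORE THAN ONE '## Real User Quotes' heading line: on a duplicated
-- heading A's keeping the section open and B's closing it at the repeated heading are both
-- defensible readings, so no value there is specified.
def Pre_count_quotes_in_md_py (markdown : String) : Prop :=
  ((PySem.Str.splitlines markdown).map PySem.Str.strip).countP
    (fun s => PySem.Str.startswith s "## Real User Quotes") ≤ 1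
instance (markdown : String) : Decidable (Pre_count_quotes_in_md_py markdown) := by
  unfold Pre_count_quotes_in_md_py; infer_instance

def pvWitness_count_quotes_in_md_py : String := "## Real User Quotes\n> a\n> b\n## Next\n> c"

def Spec_count_quotes_in_md_py (markdown : String) (out : Int) : Prop := out = count_quotes_in_md_py_alt markdown
instance (markdown : String) (out : Int) : Decidable (Spec_count_quotes_in_md_py markdown out) := by unfold Spec_count_quotes_in_md_py; infer_instance

-- ===== CLAIM (what is proved, stated in full; the proofs are below) =====
def Claim_equal_count_quotes_in_md_py : Prop := ∀ (markdown : String), Dom_count_quotes_in_md_py markdown → Pre_count_quotes_in_md_py markdown → Spec_count_quotes_in_md_py markdown (count_quotes_in_md_py markdown)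

-- ===== LEMMAS AND PROOFS =====

-- abbreviations for the three line predicates (on already-stripped lines)
def pvHdr (s : String) : Bool := PySem.Str.startswith s "## Real User Quotes"
def pvEnd (s : String) : Bool := PySem.Str.startswith s "## "
def pvQuo (s : String) : Bool := PySem.Str.startswith s ">"

-- the body count B performs once the heading is found (phase 2)
def pvG2 (ss : List String) : Nat :=
  (match List.findIdx? pvEnd ss with
   | none => ss
   | some j => ss.take j).filter pvQuo |>.length

-- B as a function of the stripped line list
def pvBspec (ss : List String) : Int :=
  match List.findIdx? pvHdr ss with
  | none => 0
  | some i => (pvG2 (ss.drop (i + 1)) : Int)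

lemma enumFilter_head {α : Type} (p : α → Bool) (xs : List α) (s : Int) :
    ((((PySem.List.enumerate xs s).filter (fun q => p q.2)).map Prod.fst)).head? =
      Option.map (fun n : Nat => s + (n : Int)) (List.findIdx? p xs) := by
  induction xs generalizing s with
  | nil => simp [PySem.List.enumerate_nil]
  | cons x xs ih =>
    rw [PySem.List.enumerate_cons, List.findIdx?_cons]
    by_cases hp : p x
    · simp [hp]
    · simp only [List.filter_cons, hp, Bool.false_eq_true, if_false]
      rw [ih (s + 1)]
      cases hfi : List.findIdx? p xs with
      | none => simp
      | some n => simp; ring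

lemma g2_cons_of_end (t : String) (ss : List String) (h : pvEnd t = true) :
    pvG2 (t :: ss) = 0 := by
  simp [pvG2, List.findIdx?_cons, h]

lemma g2_cons_of_not_end (t : String) (ss : List String) (h : pvEnd t = false) :
    pvG2 (t :: ss) = (if pvQuo t then 1 else 0) + pvG2 ss := by
  simp only [pvG2, List.findIdx?_cons, h, Bool.false_eq_true, if_false]
  cases hfi : List.findIdx? pvEnd ss with
  | none => simp [List.filter_cons]; split <;> simp [Nat.add_comm]
  | some j => simp [List.filter_cons]; split <;> simp [Nat.add_comm]

lemma aLoop_true (ss : List String)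
    (hnh : ∀ s ∈ ss, pvHdr (PySem.Str.strip s) = false) : ∀ c : Int,
    pvALoop ss true c = c + (pvG2 (ss.map PySem.Str.strip) : Int) := by
  induction ss with
  | nil => intro c; simp [pvALoop, pvG2]
  | cons l rest ih =>
    intro c
    have hl : pvHdr (PySem.Str.strip l) = false := hnh l (by simp)
    have hrest : ∀ s ∈ rest, pvHdr (PySem.Str.strip s) = false :=
      fun s hs => hnh s (by simp [hs])
    simp only [pvALoop, List.map_cons, if_true]
    rw [if_neg (by simpa [pvHdr] using hl)]
    by_cases he : PySem.Str.startswith (PySem.Str.strip l) "## " = true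
    · rw [if_pos he, g2_cons_of_end _ _ he]
      simp
    · rw [if_neg he, g2_cons_of_not_end _ _ (by simpa [pvEnd] using he)]
      by_cases hq : PySem.Str.startswith (PySem.Str.strip l) ">" = true
      · rw [if_pos hq, ih hrest (c + 1), if_pos (show pvQuo _ = true from hq)]
        push_cast; ring
      · rw [if_neg hq, ih hrest c, if_neg (show ¬ pvQuo _ = true from hq)]
        simp

lemma aLoop_false (ss : List String)
    (hp : (ss.map PySem.Str.strip).countP pvHdr ≤ 1) :
    pvALoop ss false 0 = pvBspec (ss.map PySem.Str.strip) := by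
  induction ss with
  | nil => simp [pvALoop, pvBspec]
  | cons l rest ih =>
    simp only [pvALoop, List.map_cons, Bool.false_eq_true, if_false]
    by_cases hh : PySem.Str.startswith (PySem.Str.strip l) "## Real User Quotes" = true
    · have hz : (rest.map PySem.Str.strip).countP pvHdr = 0 := by
        rw [List.map_cons, List.countP_cons,
          if_pos (show pvHdr (PySem.Str.strip l) = true from hh)] at hp
        omega
      have hnh : ∀ s ∈ rest, pvHdr (PySem.Str.strip s) = false := by
        intro s hs
        have := List.countP_eq_zero.mp hz (PySem.Str.strip s) (List.mem_map_of_mem hs)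
        simpa using this
      rw [if_pos hh, aLoop_true rest hnh]
      simp only [pvBspec, List.findIdx?_cons,
        show pvHdr (PySem.Str.strip l) = true from hh, if_true]
      simp
    · have hp' : (rest.map PySem.Str.strip).countP pvHdr ≤ 1 := by
        rw [List.map_cons, List.countP_cons,
          if_neg (show ¬ pvHdr (PySem.Str.strip l) = true from hh)] at hp
        omega
      rw [if_neg hh, ih hp']
      simp only [pvBspec, List.findIdx?_cons,
        show pvHdr (PySem.Str.strip l) = false from by simpa [pvHdr] using hh,
        Bool.false_eq_true, if_false]
      cases hfi : List.findIdx? pvHdr (rest.map PySem.Str.strip) with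
      | none => simp
      | some i => simp [List.drop_succ_cons]

lemma alt_eq_bspec (markdown : String) :
    count_quotes_in_md_py_alt markdown =
      pvBspec ((PySem.Str.splitlines markdown).map PySem.Str.strip) := by
  simp only [count_quotes_in_md_py_alt]
  have hH : (fun p : Int × String => PySem.Str.startswith p.2 "## Real User Quotes")
      = (fun q : Int × String => pvHdr q.2) := rfl
  have hE : (fun p : Int × String => PySem.Str.startswith p.2 "## ")
      = (fun q : Int × String => pvEnd q.2) := rfl
  have hQ : (fun s : String => PySem.Str.startswith s ">") = pvQuo := rfl
  rw [hH, hE, hQ]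
  set lines := (PySem.Str.splitlines markdown).map PySem.Str.strip with hl
  have hhead := enumFilter_head pvHdr lines 0
  cases hfi : List.findIdx? pvHdr lines with
  | none =>
    simp only [hfi, Option.map_none, List.head?_eq_none_iff] at hhead
    rw [hhead]
    simp [pvBspec, hfi]
  | some i =>
    simp only [hfi, Option.map_some] at hhead
    cases hlist : ((PySem.List.enumerate lines 0).filter (fun q => pvHdr q.2)).map Prod.fst with
    | nil => rw [hlist] at hhead; simp at hhead
    | cons h tl =>
      rw [hlist] at hhead
      simp only [List.head?_cons, Option.some_inj] at hhead
      subst hhead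
      have hbody : PySem.List.slice lines (some (0 + (i : Int) + 1)) none = lines.drop (i + 1) := by
        rw [show (0 : Int) + (i : Int) + 1 = ((i + 1 : Nat) : Int) by push_cast; ring,
          PySem.List.slice_from_natCast]
      simp only [hbody]
      have hhead2 := enumFilter_head pvEnd (lines.drop (i + 1)) 0
      cases hfe : List.findIdx? pvEnd (lines.drop (i + 1)) with
      | none =>
        simp only [hfe, Option.map_none, List.head?_eq_none_iff] at hhead2
        simp only [hhead2]
        simp [pvBspec, pvG2, hfi, hfe]
      | some j =>
        simp only [hfe, Option.map_some] at hhead2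
        cases hlist2 : ((PySem.List.enumerate (lines.drop (i + 1)) 0).filter
            (fun q => pvEnd q.2)).map Prod.fst with
        | nil => rw [hlist2] at hhead2; simp at hhead2
        | cons e tl2 =>
          rw [hlist2] at hhead2
          simp only [List.head?_cons, Option.some_inj] at hhead2
          subst hhead2
          have htake : PySem.List.slice (lines.drop (i + 1)) none (some (0 + (j : Int)))
              = (lines.drop (i + 1)).take j := by
            rw [show (0 : Int) + (j : Int) = ((j : Nat) : Int) by ring,
              PySem.List.slice_to_natCast]
          simp only [htake]
          simp [pvBspec, pvG2, hfi, hfe]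

-- ===== VERDICT (by name: the statement is the Claim_ definition above) =====
theorem count_quotes_in_md_py_spec : Claim_equal_count_quotes_in_md_py := by
  intro markdown _ hpre
  unfold Spec_count_quotes_in_md_py count_quotes_in_md_py
  rw [alt_eq_bspec, aLoop_false _ (by simpa [pvHdr, Pre_count_quotes_in_md_py] using hpre)]
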